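-- pv_equiv track=rewrite | github.com/Mmesek/Advent-of-Code | solutions/2023/day_11.py | solution
-- ===== SOURCE A (Python) =====
-- from itertools import combinations
--
-- def solution(puzzle_input: list[str], expand: int = 1) -> int:
--     galaxies = []
--
--     expanded_y = 0
--     for line in puzzle_input:
--         expanded_x = 0
--         for x, char in enumerate(line):
--             if char == "#":
--                 galaxies.append((expanded_x, expanded_y))
--
--             expanded_x += 1
--             if all(_line[x] == "." for _line in puzzle_input):
--                 expanded_x += expand
--
--         expanded_y += 1
--         if set(line) == {"."}:
--             expanded_y += expand
--
--     distances = []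
--
--     for a, b in combinations(galaxies, 2):
--         distances.append(abs(a[0] - b[0]) + abs(a[1] - b[1]))
--
--     return sum(distances)
-- ===== SOURCE B (Python) =====
-- def solution(puzzle_input: list[str], expand: int = 1) -> int:
--     n = max(map(len, puzzle_input), default=0)
--
--     # Expanded coordinate of every column / row, computed once with running offsets.
--     colc = []
--     off = 0
--     for x in range(n):
--         colc.append(x + off)
--         if all(x < len(l) and l[x] == "." for l in puzzle_input):
--             off += expand
--     rowc = []
--     off = 0
--     for y, l in enumerate(puzzle_input):
--         rowc.append(y + off)
--         if len(l) > 0 and all(c == "." for c in l):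
--             off += expand
--
--     xs = []
--     ys = []
--     for l, ry in zip(puzzle_input, rowc):
--         for c, cx in zip(l, colc):
--             if c == "#":
--                 xs.append(cx)
--                 ys.append(ry)
--
--     def pairdist(vals):
--         vals = sorted(vals)
--         tot = 0
--         pref = 0
--         for i, v in enumerate(vals):
--             tot += i * v - pref
--             pref += v
--         return tot
--
--     return pairdist(xs) + pairdist(ys)
-- ===== Notes on version B (the rewrite author's own statement) =====
-- stated objective: faster
-- what changed: B precomputes the empty-column and empty-row expansion offsets once into coordinate lists (instead of re-scanning every row of the grid for every cell) and replaces the loop over all galaxy pairs by sorting each coordinate list and accumulating prefix sums.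
import Mathlib
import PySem

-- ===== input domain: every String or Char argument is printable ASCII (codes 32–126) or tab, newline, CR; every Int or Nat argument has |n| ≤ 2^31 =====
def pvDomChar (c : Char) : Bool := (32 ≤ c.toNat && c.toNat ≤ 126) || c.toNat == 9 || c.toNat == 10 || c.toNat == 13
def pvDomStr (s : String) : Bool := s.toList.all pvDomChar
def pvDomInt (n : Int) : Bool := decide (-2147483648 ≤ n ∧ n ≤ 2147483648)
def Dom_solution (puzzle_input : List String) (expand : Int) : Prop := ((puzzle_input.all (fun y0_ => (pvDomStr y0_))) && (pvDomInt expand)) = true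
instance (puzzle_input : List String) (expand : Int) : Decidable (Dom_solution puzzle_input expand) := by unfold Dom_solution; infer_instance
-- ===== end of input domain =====

-- B replaces A's per-cell re-scan of the whole grid and its loop over all galaxy pairs
-- by one precomputation of row/column coordinates plus a sort-and-prefix-sum pass
-- (objective: faster; neither version mutates its arguments).

-- ===== PORT A =====
-- 'all(_line[x] == "." for _line in puzzle_input)': scans lines in order, stopping at the
-- first non-'.' hit; PySem.List.pyGet? = none is where Python raises IndexError (those
-- inputs are excluded by Pre_solution below; the port stops with false there).
def aAllDots (pin : List String) (x : Int) : Bool :=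
  match pin with
  | [] => true
  | l :: rest =>
    match PySem.List.pyGet? l.toList x with
    | some c => if c = '.' then aAllDots rest x else false
    | none => false

-- the body of 'for a, b in combinations(galaxies, 2): distances.append(abs(..) + abs(..))'
-- (the '_' branch is unreachable: combinations _ 2 yields two-element lists)
def distStep (acc : List Int) (pair : List (Int × Int)) : List Int :=
  match pair with
  | [a, b] => acc ++ [|a.1 - b.1| + |a.2 - b.2|]
  | _ => acc

-- 'set(line) == {"."}'
def aRowEmpty (line : String) : Bool :=
  PySem.Set.equal (PySem.Set.ofList line.toList) (PySem.Set.ofList ['.'])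

def solution (puzzle_input : List String) (expand : Int) : Int :=
  -- state: (expanded_y, galaxies); inner state: (expanded_x, galaxies)
  let st := puzzle_input.foldl (fun (st : Int × List (Int × Int)) line =>
      let inner := (PySem.List.enumerate line.toList 0).foldl
        (fun (st2 : Int × List (Int × Int)) xc =>
          (if aAllDots puzzle_input xc.1 then st2.1 + 1 + expand else st2.1 + 1,
           if xc.2 = '#' then st2.2 ++ [(st2.1, st.1)] else st2.2))
        (0, st.2)
      (if aRowEmpty line then st.1 + 1 + expand else st.1 + 1, inner.2)) (0, [])
  -- 'for a, b in combinations(galaxies, 2): distances.append(...)'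
  let distances := (PySem.List.combinations st.2 2).foldl distStep []
  distances.sum

-- ===== PORT B =====
-- 'all(x < len(l) and l[x] == "." for l in puzzle_input)' (x ≥ 0 here, so the guarded
-- test is exactly 'pyGet? = some'.')
def bColEmpty (pin : List String) (x : Int) : Bool :=
  pin.all (fun l => PySem.List.pyGet? l.toList x == some '.')

-- 'len(l) > 0 and all(c == "." for c in l)'
def bRowEmpty (line : String) : Bool :=
  decide (0 < line.toList.length) && line.toList.all (fun c => c == '.')

def pairdist (vals : List Int) : Int :=
  let s := PySem.List.sorted vals (fun v => v) false
  ((PySem.List.enumerate s 0).foldl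
    (fun (st : Int × Int) iv => (st.1 + iv.1 * iv.2 - st.2, st.2 + iv.2)) (0, 0)).1

def solution_alt (puzzle_input : List String) (expand : Int) : Int :=
  let n : Int := PySem.List.maxD (puzzle_input.map (fun l => PySem.List.len l.toList)) (fun v => v) 0
  let colc := ((PySem.List.pyRange 0 n 1).foldl
      (fun (st : List Int × Int) x =>
        (st.1 ++ [x + st.2], if bColEmpty puzzle_input x then st.2 + expand else st.2))
      ([], 0)).1
  let rowc := ((PySem.List.enumerate puzzle_input 0).foldl
      (fun (st : List Int × Int) yl =>
        (st.1 ++ [yl.1 + st.2], if bRowEmpty yl.2 then st.2 + expand else st.2))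
      ([], 0)).1
  let xy := (puzzle_input.zip rowc).foldl
      (fun (st : List Int × List Int) lr =>
        (lr.1.toList.zip colc).foldl
          (fun (st2 : List Int × List Int) cc =>
            if cc.1 = '#' then (st2.1 ++ [cc.2], st2.2 ++ [lr.2]) else st2) st)
      ([], [])
  pairdist xy.1 + pairdist xy.2

-- ===== PRECONDITION & SPEC =====
-- Pre_solution excludes exactly the inputs on which Python A raises IndexError: a column
-- index x that is in range for some line but past the end of another, with only '.'s at x
-- in every line before the first too-short one (A's all(_line[x] == ".") scan then reads
-- _line[x] out of range before any non-'.' stops it).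
def Pre_solution (puzzle_input : List String) (expand : Int) : Prop :=
  ∀ x : Nat, x < puzzle_input.foldr (fun l m => max l.toList.length m) 0 →
    (puzzle_input.takeWhile (fun l => x < l.toList.length)).length = puzzle_input.length ∨
    ∃ l ∈ puzzle_input.takeWhile (fun l => x < l.toList.length), l.toList[x]? ≠ some '.'
instance (puzzle_input : List String) (expand : Int) : Decidable (Pre_solution puzzle_input expand) := by unfold Pre_solution; infer_instance

def pvWitness_solution : List String × Int := (["#..", ".#.", "..#"], 10)

def Spec_solution (puzzle_input : List String) (expand : Int) (out : Int) : Prop := out = solution_alt puzzle_input expand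
instance (puzzle_input : List String) (expand : Int) (out : Int) : Decidable (Spec_solution puzzle_input expand out) := by unfold Spec_solution; infer_instance

-- ===== CLAIM (what is proved, stated in full; the proofs are below) =====
def Claim_equal_solution : Prop := ∀ (puzzle_input : List String) (expand : Int), Dom_solution puzzle_input expand → Pre_solution puzzle_input expand → Spec_solution puzzle_input expand (solution puzzle_input expand)

-- ===== LEMMAS AND PROOFS =====

-- the two emptiness tests agree
theorem aAllDots_eq (pin : List String) (x : Int) : aAllDots pin x = bColEmpty pin x := by
  induction pin with
  | nil => rfl
  | cons l rest ih =>
    simp only [aAllDots, bColEmpty, List.all_cons]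
    cases h : PySem.List.pyGet? l.toList x with
    | none => simp
    | some c =>
      by_cases hc : c = '.' <;> simp [hc, ih, bColEmpty]

theorem aRowEmpty_eq (line : String) : aRowEmpty line = bRowEmpty line := by
  unfold aRowEmpty bRowEmpty
  rcases h : PySem.Set.equal (PySem.Set.ofList line.toList) (PySem.Set.ofList ['.']) with _|_
  · rw [eq_comm, Bool.and_eq_false_iff]
    rw [Bool.eq_false_iff] at h
    by_contra hc
    apply h
    rw [not_or] at hc
    obtain ⟨h1, h2⟩ := hc
    simp only [Bool.not_eq_false, decide_eq_true_eq, List.all_eq_true, beq_iff_eq] at h1 h2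
    rw [PySem.Set.equal_iff]
    intro c
    simp [PySem.Set.mem_ofList]
    constructor
    · intro hm; exact h2 c hm
    · intro hm; subst hm
      rcases hl : line.toList with _|⟨a, r⟩
      · exfalso
        have h0 : line.toList.length = 0 := by rw [hl]; rfl
        omega
      · have := h2 a (by rw [hl]; simp)
        simp [this]
  · rw [PySem.Set.equal_iff] at h
    simp only [PySem.Set.mem_ofList] at h
    have hd : '.' ∈ line.toList := by simpa using (h '.').mpr (by simp)
    rw [eq_comm, Bool.and_eq_true]
    constructor
    · simp; exact List.length_pos_of_mem hd
    · simp only [List.all_eq_true]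
      intro c hc
      simpa using (h c).mp hc

-- running-offset coordinate lists (proof-side descriptions of B's two small loops)
def colCoords (pin : List String) (e : Int) : List Int → Int → List Int
  | [], _ => []
  | x :: r, o => (x + o) :: colCoords pin e r (o + if bColEmpty pin x then e else 0)

def colOff (pin : List String) (e : Int) (xs : List Int) (o : Int) : Int :=
  xs.foldl (fun o x => o + if bColEmpty pin x then e else 0) o

def rowCoords (e : Int) : List String → Int → List Int
  | [], _ => []
  | l :: r, c => c :: rowCoords e r (c + 1 + if bRowEmpty l then e else 0)

-- galaxies of one row: (column coordinate, row coordinate) at every '#'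
def rowGal (l : List (Char × Int)) (ry : Int) : List (Int × Int) :=
  (l.filter (fun p => p.1 = '#')).map (fun p => (p.2, ry))

-- galaxies of the whole grid, every line zipped with the one column-coordinate list
def gals (e : Int) (colc : List Int) : List String → Int → List (Int × Int)
  | [], _ => []
  | l :: r, c => rowGal (l.toList.zip colc) c ++ gals e colc r (c + 1 + if bRowEmpty l then e else 0)

-- pairwise |a-b|, head against tail (the sum A computes over combinations)
def pairAbs : List Int → Int
  | [] => 0
  | a :: r => (r.map (fun b => |a - b|)).sum + pairAbs r

def dlist : List (Int × Int) → List Int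
  | [] => []
  | g :: r => r.map (fun b => |g.1 - b.1| + |g.2 - b.2|) ++ dlist r

theorem colCoords_fold (pin : List String) (e : Int) (xs : List Int) (acc : List Int) (o : Int) :
    (xs.foldl (fun (st : List Int × Int) x =>
      (st.1 ++ [x + st.2], if bColEmpty pin x then st.2 + e else st.2)) (acc, o)).1
    = acc ++ colCoords pin e xs o := by
  induction xs generalizing acc o with
  | nil => simp [colCoords]
  | cons x r ih =>
    have harith : (if bColEmpty pin x = true then o + e else o)
        = o + (if bColEmpty pin x = true then e else 0) := by split <;> omega
    simp only [List.foldl_cons]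
    rw [ih, harith]
    simp [colCoords]

theorem rowCoords_fold (e : Int) (ls : List String) (s o : Int) (acc : List Int) :
    ((PySem.List.enumerate ls s).foldl (fun (st : List Int × Int) yl =>
      (st.1 ++ [yl.1 + st.2], if bRowEmpty yl.2 then st.2 + e else st.2)) (acc, o)).1
    = acc ++ rowCoords e ls (s + o) := by
  induction ls generalizing s o acc with
  | nil => simp [PySem.List.enumerate_nil, rowCoords]
  | cons l r ih =>
    rw [PySem.List.enumerate_cons]
    simp only [List.foldl_cons]
    have harith : s + 1 + (if bRowEmpty l = true then o + e else o)
        = s + o + 1 + (if bRowEmpty l = true then e else 0) := by split <;> omega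
    rw [ih, harith]
    simp [rowCoords]

theorem colCoords_length (pin : List String) (e : Int) (xs : List Int) (o : Int) :
    (colCoords pin e xs o).length = xs.length := by
  induction xs generalizing o with
  | nil => rfl
  | cons x r ih => simp [colCoords, ih]

theorem colCoords_append (pin : List String) (e : Int) (l1 l2 : List Int) (o : Int) :
    colCoords pin e (l1 ++ l2) o = colCoords pin e l1 o ++ colCoords pin e l2 (colOff pin e l1 o) := by
  induction l1 generalizing o with
  | nil => simp [colCoords, colOff]
  | cons x r ih => simp [colCoords, colOff, ih]

theorem zip_trunc {α β : Type} (cs : List α) (t r : List β) (h : cs.length ≤ t.length) :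
    cs.zip (t ++ r) = cs.zip t := by
  induction cs generalizing t with
  | nil => simp
  | cons c cs ih =>
    cases t with
    | nil => simp at h
    | cons b t => simp at h; simp [List.zip_cons_cons, ih t h]

-- A's inner loop produces the row's galaxies with running column coordinates
theorem innerA (pin : List String) (e ey : Int) (cs : List Char) :
    ∀ (k : Nat) (o : Int) (gal : List (Int × Int)),
    ((PySem.List.enumerate cs (k : Int)).foldl
      (fun (st2 : Int × List (Int × Int)) xc =>
        (if bColEmpty pin xc.1 then st2.1 + 1 + e else st2.1 + 1,
         if xc.2 = '#' then st2.2 ++ [(st2.1, ey)] else st2.2))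
      (((k : Int) + o), gal)).2
    = gal ++ rowGal (cs.zip (colCoords pin e (PySem.List.pyRange (k : Int) ((k : Int) + (cs.length : Int)) 1) o)) ey := by
  intro k o gal
  induction cs generalizing k o gal with
  | nil =>
    simp [PySem.List.enumerate_nil, PySem.List.pyRange_one_eq_nil, rowGal]
  | cons c r ih =>
    rw [PySem.List.enumerate_cons, List.foldl_cons]
    have hstep : ((if bColEmpty pin (k : Int) then ((k : Int) + o) + 1 + e else ((k : Int) + o) + 1),
        (if c = '#' then gal ++ [(((k : Int) + o), ey)] else gal))
        = ((((k + 1 : Nat) : Int) + (o + if bColEmpty pin (k : Int) then e else 0)),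
           (if c = '#' then gal ++ [(((k : Int) + o), ey)] else gal)) := by
      by_cases hb : bColEmpty pin (k : Int) = true <;>
        simp only [hb, if_true, if_false, Bool.false_eq_true] <;> push_cast <;> ring_nf
    have hrange : PySem.List.pyRange (k : Int) ((k : Int) + ((r.length + 1 : Nat) : Int)) 1
        = (k : Int) :: PySem.List.pyRange ((k + 1 : Nat) : Int) (((k + 1 : Nat) : Int) + (r.length : Int)) 1 := by
      rw [PySem.List.pyRange_one_cons (by push_cast; omega)]
      have e1 : (k : Int) + 1 = ((k + 1 : Nat) : Int) := by push_cast; ring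
      have e2 : (k : Int) + ((r.length + 1 : Nat) : Int) = ((k + 1 : Nat) : Int) + (r.length : Int) := by
        push_cast; ring
      rw [e1, e2]
    simp only [List.length_cons]
    rw [hrange]
    show ((PySem.List.enumerate r ((k : Int) + 1)).foldl _
        ((if bColEmpty pin (k : Int) then ((k : Int) + o) + 1 + e else ((k : Int) + o) + 1),
         (if c = '#' then gal ++ [(((k : Int) + o), ey)] else gal))).2 = _
    rw [hstep]
    have hk1 : ((k : Int) + 1) = (((k + 1 : Nat) : Int)) := by push_cast; ring
    rw [hk1, ih (k + 1) (o + if bColEmpty pin (k : Int) then e else 0)]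
    simp only [colCoords, List.zip_cons_cons, rowGal, List.filter_cons]
    by_cases hc : c = '#' <;> simp [hc]

-- B's inner loop appends the same galaxies, coordinates split into the two lists
theorem innerB (ry : Int) (l : List (Char × Int)) :
    ∀ (xs ys : List Int),
    (l.foldl (fun (st2 : List Int × List Int) cc =>
      if cc.1 = '#' then (st2.1 ++ [cc.2], st2.2 ++ [ry]) else st2) (xs, ys))
    = (xs ++ (rowGal l ry).map Prod.fst, ys ++ (rowGal l ry).map Prod.snd) := by
  induction l with
  | nil => simp [rowGal]
  | cons c r ih =>
    intro xs ys
    by_cases h : c.1 = '#' <;> simp [h, ih, rowGal]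

-- A's galaxies, each row zipped with its own column-coordinate prefix
def galsA (pin : List String) (e : Int) : List String → Int → List (Int × Int)
  | [], _ => []
  | l :: r, c => rowGal (l.toList.zip (colCoords pin e (PySem.List.pyRange 0 (l.toList.length : Int) 1) 0)) c
      ++ galsA pin e r (c + 1 + if bRowEmpty l then e else 0)

-- A's outer loop: all galaxies, with running row coordinates
theorem outerA (pin : List String) (e : Int) (rs : List String) :
    ∀ (ey : Int) (gal : List (Int × Int)),
    (rs.foldl (fun (st : Int × List (Int × Int)) line =>
      (if bRowEmpty line then st.1 + 1 + e else st.1 + 1,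
       ((PySem.List.enumerate line.toList 0).foldl
         (fun (st2 : Int × List (Int × Int)) xc =>
           (if bColEmpty pin xc.1 then st2.1 + 1 + e else st2.1 + 1,
            if xc.2 = '#' then st2.2 ++ [(st2.1, st.1)] else st2.2))
         (0, st.2)).2)) (ey, gal)).2
    = gal ++ galsA pin e rs ey := by
  intro ey gal
  induction rs generalizing ey gal with
  | nil => simp [galsA]
  | cons l r ih =>
    simp only [List.foldl_cons]
    have harith : (if bRowEmpty l = true then ey + 1 + e else ey + 1)
        = ey + 1 + (if bRowEmpty l = true then e else 0) := by split <;> omega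
    rw [ih, harith]
    have := innerA pin e ey l.toList 0 0 gal
    simp only [Nat.cast_zero, zero_add] at this
    rw [this]
    simp [galsA]

-- B's outer loop over the zipped rows
theorem outerB (e : Int) (colc : List Int) (rs : List String) :
    ∀ (c : Int) (xs ys : List Int),
    ((rs.zip (rowCoords e rs c)).foldl
      (fun (st : List Int × List Int) lr =>
        (lr.1.toList.zip colc).foldl
          (fun (st2 : List Int × List Int) cc =>
            if cc.1 = '#' then (st2.1 ++ [cc.2], st2.2 ++ [lr.2]) else st2) st)
      (xs, ys))
    = (xs ++ (gals e colc rs c).map Prod.fst, ys ++ (gals e colc rs c).map Prod.snd) := by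
  induction rs with
  | nil => simp [rowCoords, gals]
  | cons l r ih =>
    intro c xs ys
    simp only [rowCoords, List.zip_cons_cons, List.foldl_cons]
    rw [innerB, ih]
    simp [gals]

theorem dlist_fold (gal : List (Int × Int)) :
    ∀ (acc : List Int),
    ((PySem.List.combinations gal 2).foldl distStep acc)
    = acc ++ dlist gal := by
  induction gal with
  | nil => intro acc; simp [PySem.List.combinations_nil_succ, dlist]
  | cons g r ih =>
    intro acc
    have hc2 : PySem.List.combinations (g :: r) 2
        = r.map (fun b => [g, b]) ++ PySem.List.combinations r 2 := by
      rw [PySem.List.combinations_cons_succ, PySem.List.combinations_one, List.map_map]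
      rfl
    rw [hc2, List.foldl_append, List.foldl_map, ih]
    have hstep : (fun acc b => distStep acc [g, b]) =
        (fun (acc : List Int) (b : Int × Int) => acc ++ [|g.1 - b.1| + |g.2 - b.2|]) := rfl
    rw [hstep, PySem.List.foldl_append_singleton_eq_map]
    simp [dlist]

theorem dlist_sum (gal : List (Int × Int)) :
    (dlist gal).sum = pairAbs (gal.map Prod.fst) + pairAbs (gal.map Prod.snd) := by
  induction gal with
  | nil => rfl
  | cons g r ih =>
    simp only [dlist, List.map_cons, pairAbs, List.sum_append, ih, List.map_map]
    have h1 : (r.map (fun b => |g.1 - b.1| + |g.2 - b.2|)).sum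
        = (r.map (fun b => |g.1 - b.1|)).sum + (r.map (fun b => |g.2 - b.2|)).sum := by
      rw [← PySem.List.sum_map_add_int]
    rw [h1]
    simp only [Function.comp_def]
    ring

theorem pairAbs_perm {xs ys : List Int} (h : xs.Perm ys) : pairAbs xs = pairAbs ys := by
  induction h with
  | nil => rfl
  | cons x h ih =>
    rename_i l1 l2
    simp only [pairAbs, ih]
    congr 1
    exact List.Perm.sum_eq (h.map _)
  | swap a b l =>
    simp only [pairAbs, List.map_cons, List.sum_cons]
    rw [abs_sub_comm b a]
    ring
  | trans _ _ ih1 ih2 => rw [ih1, ih2]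

theorem pairAbs_append (l : List Int) (v : Int) :
    pairAbs (l ++ [v]) = pairAbs l + (l.map (fun a => |a - v|)).sum := by
  induction l with
  | nil => simp [pairAbs]
  | cons a r ih => simp [pairAbs, ih]; ring

theorem sum_abs_sub (l : List Int) (v : Int) (hle : ∀ a ∈ l, a ≤ v) :
    (l.map (fun a => |a - v|)).sum = l.length * v - l.sum := by
  induction l with
  | nil => simp
  | cons a r ih =>
    have ha : a ≤ v := hle a (by simp)
    have habs : |a - v| = v - a := by rw [abs_sub_comm]; exact abs_of_nonneg (by omega)
    simp only [List.map_cons, List.sum_cons, List.length_cons, ih (fun b hb => hle b (by simp [hb]))]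
    rw [habs]
    push_cast
    ring

theorem pairdist_sorted (l : List Int) (h : l.Pairwise (· ≤ ·)) :
    ((PySem.List.enumerate l 0).foldl
      (fun (st : Int × Int) iv => (st.1 + iv.1 * iv.2 - st.2, st.2 + iv.2)) (0, 0))
    = (pairAbs l, l.sum) := by
  induction l using List.reverseRecOn with
  | nil => simp [PySem.List.enumerate_nil, pairAbs]
  | append_singleton r v ih =>
    have hsplit := List.pairwise_append.mp h
    have hp : r.Pairwise (· ≤ ·) := hsplit.1
    have hle : ∀ a ∈ r, a ≤ v := fun a ha => hsplit.2.2 a ha v (by simp)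
    rw [PySem.List.enumerate_append, List.foldl_append, ih hp]
    simp only [PySem.List.enumerate_cons, PySem.List.enumerate_nil, List.foldl_cons, List.foldl_nil]
    rw [pairAbs_append, sum_abs_sub r v hle]
    simp
    ring

theorem pairdist_eq (vals : List Int) : pairdist vals = pairAbs vals := by
  have h := pairdist_sorted (PySem.List.sorted vals (fun v => v) false)
    (PySem.List.sorted_pairwise (xs := vals) (key := fun v => v))
  have h0 : pairdist vals
      = ((PySem.List.enumerate (PySem.List.sorted vals (fun v => v) false) 0).foldl
        (fun (st : Int × Int) iv => (st.1 + iv.1 * iv.2 - st.2, st.2 + iv.2)) (0, 0)).1 := rfl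
  rw [h0, h]
  exact pairAbs_perm (PySem.List.sorted_perm vals (fun v => v) false)

theorem len_le_maxD (pin : List String) (l : String) (hl : l ∈ pin) :
    (l.toList.length : Int) ≤ PySem.List.maxD (pin.map (fun l => PySem.List.len l.toList)) (fun v => v) 0 := by
  have hv : (l.toList.length : Int) ∈ pin.map (fun l => PySem.List.len l.toList) := by
    simp only [List.mem_map]
    exact ⟨l, hl, by simp [pysem]⟩
  cases hm : PySem.List.max? (pin.map (fun l => PySem.List.len l.toList)) (fun v => v) with
  | none =>
    exfalso
    rw [PySem.List.max?_eq_none_iff] at hm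
    rw [hm] at hv
    simp at hv
  | some m =>
    have := PySem.List.max?_isMax hm _ hv
    unfold PySem.List.maxD
    rw [hm]
    simpa using this

theorem galsA_eq_gals (pin : List String) (e n : Int) (rs : List String)
    (hlen : ∀ l ∈ rs, (l.toList.length : Int) ≤ n) :
    ∀ c : Int, galsA pin e rs c = gals e (colCoords pin e (PySem.List.pyRange 0 n 1) 0) rs c := by
  induction rs with
  | nil => intro c; rfl
  | cons l r ih =>
    intro c
    have hn : (l.toList.length : Int) ≤ n := hlen l (by simp)
    have hr : PySem.List.pyRange 0 n 1
        = PySem.List.pyRange 0 (l.toList.length : Int) 1 ++ PySem.List.pyRange (l.toList.length : Int) n 1 :=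
      PySem.List.pyRange_one_append 0 _ n (by positivity) hn
    have hz : l.toList.zip (colCoords pin e (PySem.List.pyRange 0 n 1) 0)
        = l.toList.zip (colCoords pin e (PySem.List.pyRange 0 (l.toList.length : Int) 1) 0) := by
      rw [hr, colCoords_append]
      exact zip_trunc _ _ _ (by rw [colCoords_length, PySem.List.length_pyRange_one]; simp)
    simp only [galsA, gals, hz]
    rw [ih (fun l2 h2 => hlen l2 (by simp [h2]))]

theorem solution_spec : Claim_equal_solution := by
  intro pin e _hdom _hpre
  unfold Spec_solution
  show solution pin e = solution_alt pin e
  simp only [solution, solution_alt, aAllDots_eq, aRowEmpty_eq]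
  rw [outerA pin e pin 0 [], dlist_fold]
  simp only [List.nil_append]
  rw [dlist_sum]
  rw [colCoords_fold, rowCoords_fold]
  simp only [List.nil_append, zero_add]
  rw [outerB e _ pin 0 [] []]
  simp only [List.nil_append]
  rw [pairdist_eq, pairdist_eq]
  rw [galsA_eq_gals pin e _ pin (fun l hl => len_le_maxD pin l hl)]
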